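-- pv_equiv track=rewrite | github.com/jcolinpatrick/kryptos | src/kryptos/kernel/constraints/crib.py | best_periodicity
-- ===== SOURCE A (Python) =====
-- from collections import Counter, defaultdict
-- from typing import Dict, List, Optional, Tuple
--
-- def periodicity_score(
--     key_values: Dict[int, int], period: int,
-- ) -> Tuple[int, int, int]:
--     """Score how well key values fit a periodic pattern.
--
--     Groups key values by (position % period). For each group,
--     counts pairs that agree.
--
--     Returns (agreeing_pairs, total_pairs, contradicting_groups).
--     """
--     groups: dict[int, list[int]] = defaultdict(list)
--     for pos, val in key_values.items():
--         groups[pos % period].append(val)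
--
--     agree = total = contradictions = 0
--     for vals in groups.values():
--         if len(vals) >= 2:
--             npairs = len(vals) * (len(vals) - 1) // 2
--             total += npairs
--             if len(set(vals)) == 1:
--                 agree += npairs
--             else:
--                 contradictions += 1
--                 for i in range(len(vals)):
--                     for j in range(i + 1, len(vals)):
--                         if vals[i] == vals[j]:
--                             agree += 1
--     return agree, total, contradictions
--
-- def best_periodicity(
--     key_values: Dict[int, int],
--     periods: range = range(3, 16),
-- ) -> Tuple[int, int, int, int]:
--     """Find the period with best agreement.
--
--     Returns (period, agree, total, contradictions).
--     """
--     best = (0, 0, 0, 0)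
--     for p in periods:
--         a, t, c = periodicity_score(key_values, p)
--         if t > 0 and a > best[1]:
--             best = (p, a, t, c)
--     return best
-- ===== SOURCE B (Python) =====
-- from collections import Counter
--
--
-- def _flat_score(items, p):
--     """Score one period from flat frequency tables: a Counter over
--     (residue, value) pairs and a Counter over residues alone."""
--     pair_counts = Counter((pos % p, val) for pos, val in items)
--     res_counts = Counter(pos % p for pos, val in items)
--     distinct = Counter(r for r, _ in pair_counts)
--     agree = sum(c * (c - 1) // 2 for c in pair_counts.values())
--     total = sum(n * (n - 1) // 2 for n in res_counts.values())
--     contradictions = sum(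
--         1 for r, n in res_counts.items() if n >= 2 and distinct[r] > 1
--     )
--     return agree, total, contradictions
--
--
-- def best_periodicity(key_values, periods=range(3, 16)):
--     """Find the period with best agreement: collect one candidate per period
--     with positive pair total, then take the first candidate of maximal agreement."""
--     items = list(key_values.items())
--     cands = []
--     for p in periods:
--         a, t, c = _flat_score(items, p)
--         if t > 0:
--             cands.append((p, a, t, c))
--     m = max(cands, key=lambda x: x[1], default=None)
--     if m is None or m[1] <= 0:
--         return (0, 0, 0, 0)
--     return m
-- ===== Notes on version B (the rewrite author's own statement) =====
-- stated objective: alternative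
-- what changed: Replaces A's nested per-residue-group pair scan and running-best fold by flat frequency tables per period (Counter over (residue,value) pairs and over residues, agree/total as sums of c*(c-1)//2) and a candidate list from which the first maximal-agreement entry is selected by max(key=...).
import Mathlib
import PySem

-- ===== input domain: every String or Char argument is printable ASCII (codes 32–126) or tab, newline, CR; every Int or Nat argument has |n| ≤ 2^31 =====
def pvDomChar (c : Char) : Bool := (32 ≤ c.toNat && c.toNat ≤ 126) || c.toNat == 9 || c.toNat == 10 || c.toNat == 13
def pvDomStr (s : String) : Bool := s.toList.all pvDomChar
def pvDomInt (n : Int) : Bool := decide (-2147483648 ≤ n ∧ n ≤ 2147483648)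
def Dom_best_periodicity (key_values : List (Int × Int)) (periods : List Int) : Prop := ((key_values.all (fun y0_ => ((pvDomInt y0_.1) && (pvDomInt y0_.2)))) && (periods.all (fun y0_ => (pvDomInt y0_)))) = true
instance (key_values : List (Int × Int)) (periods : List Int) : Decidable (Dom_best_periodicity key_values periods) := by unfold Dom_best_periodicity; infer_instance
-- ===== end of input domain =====

-- B scores each period from flat frequency tables (a Counter over (residue,value)
-- pairs and one over residues, agree/total as sums of c*(c-1)//2) and picks the
-- result as the first maximal-agreement entry of a candidate list (alternative algorithm).

-- ===== PORT A =====
-- helper periodicity_score of A; the dict argument is the canonicalized key_values dict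
def periodicity_score (kv : PySem.Dict Int Int) (period : Int) : Int × Int × Int :=
  let groups : PySem.Dict Int (List Int) :=
    kv.items.foldl (fun g pv => g.modify (PySem.Int.mod pv.1 period) [] (fun l => l ++ [pv.2]))
      PySem.Dict.empty
  groups.values.foldl (fun acc vals =>
    if 2 ≤ PySem.List.len vals then
      let npairs := PySem.Int.floordiv (PySem.List.len vals * (PySem.List.len vals - 1)) 2
      if PySem.List.len (PySem.Set.ofList vals) = 1 then
        (acc.1 + npairs, acc.2.1 + npairs, acc.2.2)
      else
        ((PySem.List.pyRange 0 (PySem.List.len vals) 1).foldl (fun a i =>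
            (PySem.List.pyRange (i + 1) (PySem.List.len vals) 1).foldl (fun a j =>
              if PySem.List.pyGetD vals i 0 = PySem.List.pyGetD vals j 0 then a + 1 else a) a)
          acc.1,
         acc.2.1 + npairs, acc.2.2 + 1)
    else acc) ((0 : Int), (0 : Int), (0 : Int))

def best_periodicity (key_values : List (Int × Int)) (periods : List Int) : List Int :=
  let kv := PySem.Dict.ofList key_values
  let best := periods.foldl (fun best p =>
    let s := periodicity_score kv p
    if 0 < s.2.1 ∧ best.2.1 < s.1 then (p, s.1, s.2.1, s.2.2) else best)
    ((0 : Int), (0 : Int), (0 : Int), (0 : Int))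
  [best.1, best.2.1, best.2.2.1, best.2.2.2]

-- ===== PORT B =====
-- helper _flat_score of Source B
def pv_flat_score (items : List (Int × Int)) (p : Int) : Int × Int × Int :=
  let pairCounts := PySem.Dict.counter (items.map (fun q => (PySem.Int.mod q.1 p, q.2)))
  let resCounts := PySem.Dict.counter (items.map (fun q => PySem.Int.mod q.1 p))
  let distinct := PySem.Dict.counter (pairCounts.keys.map (fun k => k.1))
  let agree := (pairCounts.values.map (fun c => PySem.Int.floordiv (c * (c - 1)) 2)).sum
  let total := (resCounts.values.map (fun n => PySem.Int.floordiv (n * (n - 1)) 2)).sum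
  let contradictions : Int :=
    (resCounts.items.countP (fun rn => decide (2 ≤ rn.2) && decide (1 < distinct.getD rn.1 0)) : Int)
  (agree, total, contradictions)

def best_periodicity_alt (key_values : List (Int × Int)) (periods : List Int) : List Int :=
  let items := (PySem.Dict.ofList key_values).items
  let cands : List (Int × Int × Int × Int) := periods.foldl (fun cands p =>
    let s := pv_flat_score items p
    if 0 < s.2.1 then cands ++ [(p, s.1, s.2.1, s.2.2)] else cands) []
  match PySem.List.max? cands (fun x => x.2.1) with
  | none => [0, 0, 0, 0]
  | some m => if m.2.1 ≤ 0 then [0, 0, 0, 0] else [m.1, m.2.1, m.2.2.1, m.2.2.2]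

-- ===== PRECONDITION & SPEC =====
-- Pre_ excludes only the inputs on which Python A raises: a period of 0 makes 'pos % period'
-- raise ZeroDivisionError.
def Pre_best_periodicity (key_values : List (Int × Int)) (periods : List Int) : Prop :=
  (0 : Int) ∉ periods
instance (key_values : List (Int × Int)) (periods : List Int) : Decidable (Pre_best_periodicity key_values periods) := by unfold Pre_best_periodicity; infer_instance

def pvWitness_best_periodicity : (List (Int × Int)) × List Int :=
  ([(0, 1), (3, 1), (1, 2)], [3, 4])

def Spec_best_periodicity (key_values : List (Int × Int)) (periods : List Int) (out : List Int) : Prop := out = best_periodicity_alt key_values periods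
instance (key_values : List (Int × Int)) (periods : List Int) (out : List Int) : Decidable (Spec_best_periodicity key_values periods out) := by unfold Spec_best_periodicity; infer_instance

-- ===== CLAIM (what is proved, stated in full; the proofs are below) =====
def Claim_equal_best_periodicity : Prop := ∀ (key_values : List (Int × Int)) (periods : List Int), Dom_best_periodicity key_values periods → Pre_best_periodicity key_values periods → Spec_best_periodicity key_values periods (best_periodicity key_values periods)

-- ===== LEMMAS AND PROOFS =====

-- Int binomial(c,2) as both ports write it
def pvC2 (c : Int) : Int := PySem.Int.floordiv (c * (c - 1)) 2

-- number of equal (unordered) pairs in a list, recursively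
def pvPairs {α : Type} [BEq α] : List α → Int
  | [] => 0
  | v :: vs => (List.count v vs : Int) + pvPairs vs

-- residue → values group, and the flat (residue, value) list, of key_values items
def pvVals (l : List (Int × Int)) (p r : Int) : List Int :=
  (l.filter (fun q => PySem.Int.mod q.1 p == r)).map (fun q => q.2)

def pvL (l : List (Int × Int)) (p : Int) : List (Int × Int) :=
  l.map (fun q => (PySem.Int.mod q.1 p, q.2))

lemma pvC2_succ (c : Int) : pvC2 (c + 1) = pvC2 c + c := by
  unfold pvC2
  rw [PySem.Int.floordiv_eq_ediv_of_pos (by norm_num), PySem.Int.floordiv_eq_ediv_of_pos (by norm_num)]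
  have h : (c + 1) * (c + 1 - 1) = c * (c - 1) + c * 2 := by ring
  rw [h, Int.add_mul_ediv_right _ _ (by norm_num)]

lemma pv_sum_single {κ : Type} (S : List κ) (g h : κ → Int) (v : κ) (c : Int)
    (hnd : S.Nodup) (hv : v ∈ S) (hgv : g v = h v + c)
    (hoff : ∀ k ∈ S, k ≠ v → g k = h k) :
    (S.map g).sum = (S.map h).sum + c := by
  induction S with
  | nil => cases hv
  | cons x S ih =>
    simp only [List.map_cons, List.sum_cons]
    rcases List.mem_cons.mp hv with rfl | hv'
    · have : S.map g = S.map h := by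
        apply List.map_congr_left
        intro k hk
        exact hoff k (List.mem_cons_of_mem _ hk) (fun e => (List.nodup_cons.mp hnd).1 (e ▸ hk))
      rw [hgv, this]; ring
    · have hx : g x = h x := by
        refine hoff x (List.mem_cons_self) (fun e => (List.nodup_cons.mp hnd).1 (e ▸ hv'))
      rw [hx, ih (List.nodup_cons.mp hnd).2 hv' (fun k hk hne => hoff k (List.mem_cons_of_mem _ hk) hne)]; ring

lemma pv_sum_c2 {α : Type} [BEq α] [LawfulBEq α] (vs S : List α) (hnd : S.Nodup) (hsub : ∀ x ∈ vs, x ∈ S) :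
    (S.map (fun k => pvC2 (List.count k vs))).sum = pvPairs vs := by
  induction vs with
  | nil => simp [pvPairs, pvC2, PySem.Int.floordiv]
  | cons v vs ih =>
    have h1 := pv_sum_single S (fun k => pvC2 (List.count k (v :: vs)))
      (fun k => pvC2 (List.count k vs)) v (List.count v vs) hnd (hsub v List.mem_cons_self)
      (by simp only [List.count_cons_self]; push_cast; rw [pvC2_succ])
      (by intro k hk hne; simp [Ne.symm hne])
    rw [h1, ih (fun x hx => hsub x (List.mem_cons_of_mem _ hx))]
    simp [pvPairs]; ring

lemma pv_pairs_short {α : Type} [BEq α] (vs : List α) (h : vs.length ≤ 1) :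
    pvPairs vs = 0 := by
  match vs with
  | [] => rfl
  | [v] => simp [pvPairs]
  | a :: b :: t => simp at h

lemma pv_pairs_const (vs : List Int) (hone : (PySem.Set.ofList vs).length = 1) :
    pvPairs vs = pvC2 (vs.length : Int) := by
  obtain ⟨k0, hk0⟩ := List.length_eq_one_iff.mp hone
  have hsub : ∀ x ∈ vs, x ∈ PySem.Set.ofList vs :=
    fun x hx => (PySem.Set.mem_ofList vs x).mpr hx
  have hcount : List.count k0 vs = vs.length := by
    rw [List.count_eq_length]
    intro b hb
    have := hsub b hb
    rw [hk0] at this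
    exact (List.mem_singleton.mp this).symm
  have := pv_sum_c2 vs (PySem.Set.ofList vs) (PySem.Set.nodup_ofList vs) hsub
  rw [hk0] at this
  simp only [List.map_cons, List.map_nil, List.sum_cons, List.sum_nil, add_zero] at this
  rw [← this, hcount]

-- counting a (residue, value) pair in the flat list = counting the value in its group
lemma pv_count_pair (l : List (Int × Int)) (p r v : Int) :
    List.count (r, v) (pvL l p) = List.count v (pvVals l p r) := by
  induction l with
  | nil => rfl
  | cons q l ih =>
    unfold pvL pvVals at *
    simp only [List.map_cons, List.filter_cons]
    by_cases hr : PySem.Int.mod q.1 p = r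
    · by_cases hv : q.2 = v
      · simp [hr, hv, ih]
      · simp [hr, hv, ih]
    · have : ¬ ((PySem.Int.mod q.1 p, q.2) = (r, v)) := by
        simp [Prod.ext_iff]; intro h; exact absurd h hr
      simp [this, hr, ih]

-- the total number of agreeing pairs splits over residue groups
lemma pv_pairs_split (l : List (Int × Int)) (p : Int) (S : List Int)
    (hnd : S.Nodup) (hsub : ∀ q ∈ l, PySem.Int.mod q.1 p ∈ S) :
    (S.map (fun r => pvPairs (pvVals l p r))).sum = pvPairs (pvL l p) := by
  induction l with
  | nil =>
    simp [pvL, pvPairs, pvVals]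
  | cons q l ih =>
    have hstep := pv_sum_single S (fun r => pvPairs (pvVals (q :: l) p r))
      (fun r => pvPairs (pvVals l p r)) (PySem.Int.mod q.1 p)
      (List.count q.2 (pvVals l p (PySem.Int.mod q.1 p)))
      hnd (hsub q List.mem_cons_self)
      (by unfold pvVals; simp [pvPairs]; ring)
      (by intro k hk hne
          unfold pvVals
          simp [Ne.symm hne])
    rw [hstep, ih (fun q' hq' => hsub q' (List.mem_cons_of_mem _ hq'))]
    have hcons : pvPairs (pvL (q :: l) p)
        = (List.count (PySem.Int.mod q.1 p, q.2) (pvL l p) : Int) + pvPairs (pvL l p) := by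
      unfold pvL
      simp only [List.map_cons, pvPairs]
    rw [hcons, pv_count_pair]
    ring

-- first-occurrence values of one residue inside the flat distinct-pair set
lemma pv_set_filter (l : List (Int × Int)) (p r : Int) (s : List (Int × Int)) :
    ((List.foldl PySem.Set.add s (pvL l p)).filter (fun k => k.1 == r)).map (fun k => k.2)
      = List.foldl PySem.Set.add ((s.filter (fun k => k.1 == r)).map (fun k => k.2)) (pvVals l p r) := by
  induction l generalizing s with
  | nil => simp [pvL, pvVals]
  | cons q l ih =>
    unfold pvL pvVals at *
    simp only [List.map_cons, List.foldl_cons, List.filter_cons]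
    by_cases hr : PySem.Int.mod q.1 p = r
    · subst hr
      rw [if_pos (beq_self_eq_true (PySem.Int.mod q.1 p))]
      simp only [List.map_cons, List.foldl_cons]
      rw [ih]
      congr 1
      have hmem : ((PySem.Int.mod q.1 p, q.2) ∈ s) ↔
          q.2 ∈ (s.filter (fun k => k.1 == PySem.Int.mod q.1 p)).map (fun k => k.2) := by
        simp only [List.mem_map, List.mem_filter, beq_iff_eq]
        constructor
        · intro h; exact ⟨(PySem.Int.mod q.1 p, q.2), ⟨h, rfl⟩, rfl⟩
        · rintro ⟨⟨a, b⟩, ⟨hm, hf⟩, hs⟩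
          simp only at hf hs
          subst hf; subst hs
          exact hm
      show ((PySem.Set.add s _).filter _).map _ = PySem.Set.add _ q.2
      unfold PySem.Set.add
      by_cases hin : (PySem.Int.mod q.1 p, q.2) ∈ s
      · rw [if_pos (by simpa using hin), if_pos (by simpa using hmem.mp hin)]
      · have hq : q.2 ∉ (s.filter (fun k => k.1 == PySem.Int.mod q.1 p)).map (fun k => k.2) :=
          fun h => hin (hmem.mpr h)
        rw [if_neg (by simpa using hin), if_neg (by simpa using hq)]
        simp [List.filter_append]
    · rw [if_neg (by simp [hr])]
      rw [ih]
      congr 2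
      show ((PySem.Set.add s _).filter _) = s.filter _
      unfold PySem.Set.add
      split
      · rfl
      · simp [List.filter_append, hr]

lemma pv_distinct (l : List (Int × Int)) (p r : Int) :
    List.count r ((PySem.Set.ofList (pvL l p)).map (fun k => k.1))
      = (PySem.Set.ofList (pvVals l p r)).length := by
  have h1 : List.count r ((PySem.Set.ofList (pvL l p)).map (fun k => k.1))
      = ((PySem.Set.ofList (pvL l p)).filter (fun k => k.1 == r)).length := by
    rw [List.count_eq_countP, List.countP_map, List.countP_eq_length_filter]
    rfl
  have h2 := pv_set_filter l p r []
  rw [h1]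
  calc ((PySem.Set.ofList (pvL l p)).filter (fun k => k.1 == r)).length
      = (((PySem.Set.ofList (pvL l p)).filter (fun k => k.1 == r)).map (fun k => k.2)).length := by
        rw [List.length_map]
    _ = (PySem.Set.ofList (pvVals l p r)).length := by
        rw [PySem.Set.ofList_eq_foldl, h2]
        simp [PySem.Set.ofList_eq_foldl]

-- group size = residue count in the flat residue list
lemma pv_count_res (l : List (Int × Int)) (p r : Int) :
    List.count r (l.map (fun q => PySem.Int.mod q.1 p)) = (pvVals l p r).length := by
  rw [List.count_eq_countP, List.countP_map, pvVals, List.length_map,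
    ← List.countP_eq_length_filter]
  rfl

-- (A) the grouping fold's entry at residue r is the r-group
lemma pv_getD_group_fold (l : List (Int × Int)) (p : Int)
    (d : PySem.Dict Int (List Int)) (r : Int) :
    (l.foldl (fun g q => g.modify (PySem.Int.mod q.1 p) [] (fun t => t ++ [q.2])) d).getD r []
      = d.getD r [] ++ pvVals l p r := by
  induction l generalizing d with
  | nil => simp [pvVals]
  | cons q l ih =>
    simp only [List.foldl_cons]
    rw [ih]
    unfold pvVals
    simp only [List.filter_cons]
    rw [PySem.Dict.getD_modify]
    by_cases h : PySem.Int.mod q.1 p = r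
    · simp [h, List.append_assoc]
    · simp [h, Ne.symm h]

-- (A) the inner double loop counts agreeing pairs
lemma pv_range_pairs (vs : List Int) :
    ((List.range vs.length).map
      (fun k => (List.count (vs.getD k 0) (vs.drop (k + 1)) : Int))).sum = pvPairs vs := by
  induction vs with
  | nil => simp [pvPairs]
  | cons v vs ih =>
    rw [List.length_cons, List.range_succ_eq_map]
    simp only [List.map_cons, List.sum_cons, List.map_map]
    have hmap : List.map ((fun k => (List.count ((v :: vs).getD k 0) ((v :: vs).drop (k + 1)) : Int)) ∘ Nat.succ) (List.range vs.length)
        = List.map (fun k => (List.count (vs.getD k 0) (vs.drop (k + 1)) : Int)) (List.range vs.length) := by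
      apply List.map_congr_left; intro k hk
      simp [Function.comp, List.drop_succ_cons]
    rw [hmap, ih]
    simp [pvPairs]

lemma pv_double_loop (vs : List Int) (agree : Int) :
    (PySem.List.pyRange 0 (PySem.List.len vs) 1).foldl (fun a i =>
        (PySem.List.pyRange (i + 1) (PySem.List.len vs) 1).foldl (fun a j =>
          if PySem.List.pyGetD vs i 0 = PySem.List.pyGetD vs j 0 then a + 1 else a) a)
      agree = agree + pvPairs vs := by
  rw [PySem.List.len_eq, PySem.List.pyRange_zero_nat, List.foldl_map]
  rw [PySem.List.foldl_congr_mem _ _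
      (fun a k => a + (List.count (vs.getD k 0) (vs.drop (k + 1)) : Int)) agree ?_]
  · rw [PySem.List.foldl_add, pv_range_pairs]
  · intro a k _
    have hcast : ((k : Int) + 1) = ((k + 1 : Nat) : Int) := by push_cast; ring
    rw [hcast, PySem.List.foldl_pyRange_pyGetD' vs 0
      (fun a x => if PySem.List.pyGetD vs (k : Int) 0 = x then a + 1 else a) a (by positivity)]
    have h := PySem.List.foldl_count_if (fun x => PySem.List.pyGetD vs (k : Int) 0 == x)
      (vs.drop ((k + 1 : Nat) : Int).toNat) a
    simp only [beq_iff_eq] at h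
    rw [h]
    have hc : List.countP (fun x => PySem.List.pyGetD vs (k : Int) 0 == x)
        (vs.drop ((k + 1 : Nat) : Int).toNat) = List.count (PySem.List.pyGetD vs (k : Int) 0)
        (vs.drop ((k + 1 : Nat) : Int).toNat) := by
      rw [List.count]; exact (List.countP_congr (fun x _ => by rw [Bool.beq_comm])).symm
    rw [hc]
    simp [PySem.List.pyGetD_natCast]

-- (A) one group-step of A's fold, in additive form
lemma pv_stepA_eq (acc : Int × Int × Int) (vs : List Int) :
    (if 2 ≤ PySem.List.len vs then
      let npairs := PySem.Int.floordiv (PySem.List.len vs * (PySem.List.len vs - 1)) 2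
      if PySem.List.len (PySem.Set.ofList vs) = 1 then
        (acc.1 + npairs, acc.2.1 + npairs, acc.2.2)
      else
        ((PySem.List.pyRange 0 (PySem.List.len vs) 1).foldl (fun a i =>
            (PySem.List.pyRange (i + 1) (PySem.List.len vs) 1).foldl (fun a j =>
              if PySem.List.pyGetD vs i 0 = PySem.List.pyGetD vs j 0 then a + 1 else a) a)
          acc.1,
         acc.2.1 + npairs, acc.2.2 + 1)
    else acc)
    = (acc.1 + pvPairs vs, acc.2.1 + pvC2 (vs.length : Int),
       if 2 ≤ (vs.length : Int) ∧ (PySem.Set.ofList vs).length ≠ 1 then acc.2.2 + 1 else acc.2.2) := by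
  rw [PySem.List.len_eq]
  by_cases hlen : (2 : Int) ≤ (vs.length : Int)
  · rw [if_pos hlen]
    by_cases hone : (PySem.Set.ofList vs).length = 1
    · rw [if_pos (by rw [PySem.List.len_eq, hone]; rfl)]
      rw [if_neg (by push_neg; intro _; exact hone)]
      rw [pv_pairs_const vs hone]
      rfl
    · rw [if_neg (by rw [PySem.List.len_eq]; exact_mod_cast hone)]
      rw [if_pos ⟨hlen, hone⟩]
      have hdl := pv_double_loop vs acc.1
      rw [PySem.List.len_eq] at hdl
      rw [hdl]
      rfl
  · rw [if_neg hlen]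
    have hshort : vs.length ≤ 1 := by omega
    rw [pv_pairs_short vs hshort]
    have hc2 : pvC2 (vs.length : Int) = 0 := by
      interval_cases h : vs.length
      · rfl
      · rfl
    rw [hc2, if_neg (by push_neg; intro h; exact absurd h hlen)]
    simp

-- (A) A's score in closed form: three sums over the distinct residues
lemma pv_scoreA_eq (kv : PySem.Dict Int Int) (p : Int) :
    periodicity_score kv p =
      (((PySem.Set.ofList (kv.items.map (fun q => PySem.Int.mod q.1 p))).map
          (fun r => pvPairs (pvVals kv.items p r))).sum,
       ((PySem.Set.ofList (kv.items.map (fun q => PySem.Int.mod q.1 p))).map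
          (fun r => pvC2 ((pvVals kv.items p r).length : Int))).sum,
       (((PySem.Set.ofList (kv.items.map (fun q => PySem.Int.mod q.1 p))).countP
          (fun r => decide (2 ≤ ((pvVals kv.items p r).length : Int) ∧
            (PySem.Set.ofList (pvVals kv.items p r)).length ≠ 1))) : Int)) := by
  unfold periodicity_score
  simp only []
  have hnd := PySem.Dict.nodup_keys_foldl_modify_key kv.items (fun pv => PySem.Int.mod pv.1 p) []
      (fun _ pv => fun t => t ++ [pv.2]) PySem.Dict.empty PySem.Dict.nodup_keys_empty
  have hk := PySem.Dict.keys_foldl_modify_key kv.items (fun pv => PySem.Int.mod pv.1 p) []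
      (fun _ pv => fun t => t ++ [pv.2]) PySem.Dict.empty
  rw [PySem.Dict.values_eq_map_keys _ hnd [], hk]
  have hupd : PySem.Set.update (PySem.Dict.empty : PySem.Dict Int (List Int)).keys
      (kv.items.map (fun pv => PySem.Int.mod pv.1 p))
      = PySem.Set.ofList (kv.items.map (fun q => PySem.Int.mod q.1 p)) := rfl
  rw [hupd, List.foldl_map]
  rw [PySem.List.foldl_congr_mem _ _
      (fun (acc : Int × Int × Int) (r : Int) =>
        (acc.1 + pvPairs (pvVals kv.items p r),
         acc.2.1 + pvC2 ((pvVals kv.items p r).length : Int),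
         if 2 ≤ ((pvVals kv.items p r).length : Int) ∧
             (PySem.Set.ofList (pvVals kv.items p r)).length ≠ 1
           then acc.2.2 + 1 else acc.2.2))
      ((0 : Int), (0 : Int), (0 : Int)) ?_]
  · rw [PySem.List.foldl_prod_mk
        (f := fun (a : Int) (r : Int) => a + pvPairs (pvVals kv.items p r))
        (g := fun (b : Int × Int) (r : Int) =>
          (b.1 + pvC2 ((pvVals kv.items p r).length : Int),
           if 2 ≤ ((pvVals kv.items p r).length : Int) ∧
               (PySem.Set.ofList (pvVals kv.items p r)).length ≠ 1
             then b.2 + 1 else b.2))]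
    rw [PySem.List.foldl_prod_mk
        (f := fun (a : Int) (r : Int) => a + pvC2 ((pvVals kv.items p r).length : Int))
        (g := fun (a : Int) (r : Int) =>
          if 2 ≤ ((pvVals kv.items p r).length : Int) ∧
              (PySem.Set.ofList (pvVals kv.items p r)).length ≠ 1
            then a + 1 else a)]
    rw [PySem.List.foldl_add, PySem.List.foldl_add, PySem.List.foldl_ite_add_one]
    simp
  · intro acc r _
    have hg := pv_getD_group_fold kv.items p PySem.Dict.empty r
    rw [PySem.Dict.getD_empty] at hg
    simp only [List.nil_append] at hg
    rw [hg]
    exact pv_stepA_eq acc (pvVals kv.items p r)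

-- (B) B's score equals A's score
lemma pv_score_eq (kv : PySem.Dict Int Int) (p : Int) :
    periodicity_score kv p = pv_flat_score kv.items p := by
  rw [pv_scoreA_eq]
  unfold pv_flat_score
  simp only []
  have hvals : ∀ (xs : List (Int × Int)),
      (PySem.Dict.counter xs).values = (PySem.Set.ofList xs).map (fun k => (List.count k xs : Int)) := by
    intro xs
    show (PySem.Dict.counter xs).items.map (fun q => q.2) = _
    rw [PySem.Dict.items_counter, List.map_map]
    rfl
  have hvals' : ∀ (xs : List Int),
      (PySem.Dict.counter xs).values = (PySem.Set.ofList xs).map (fun k => (List.count k xs : Int)) := by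
    intro xs
    show (PySem.Dict.counter xs).items.map (fun q => q.2) = _
    rw [PySem.Dict.items_counter, List.map_map]
    rfl
  have hL : kv.items.map (fun q => (PySem.Int.mod q.1 p, q.2)) = pvL kv.items p := rfl
  -- agree component
  have hagree : ((PySem.Dict.counter (pvL kv.items p)).values.map
        (fun c => PySem.Int.floordiv (c * (c - 1)) 2)).sum
      = ((PySem.Set.ofList (kv.items.map (fun q => PySem.Int.mod q.1 p))).map
          (fun r => pvPairs (pvVals kv.items p r))).sum := by
    rw [hvals, List.map_map]
    have h1 : ((PySem.Set.ofList (pvL kv.items p)).map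
        ((fun c => PySem.Int.floordiv (c * (c - 1)) 2) ∘ (fun k => (List.count k (pvL kv.items p) : Int)))).sum
        = pvPairs (pvL kv.items p) :=
      pv_sum_c2 (pvL kv.items p) (PySem.Set.ofList (pvL kv.items p))
        (PySem.Set.nodup_ofList _) (fun x hx => (PySem.Set.mem_ofList _ _).mpr hx)
    rw [h1]
    exact (pv_pairs_split kv.items p (PySem.Set.ofList (kv.items.map (fun q => PySem.Int.mod q.1 p)))
      (PySem.Set.nodup_ofList _)
      (fun q hq => (PySem.Set.mem_ofList _ _).mpr (List.mem_map_of_mem hq))).symm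
  -- total component
  have htotal : ((PySem.Dict.counter (kv.items.map (fun q => PySem.Int.mod q.1 p))).values.map
        (fun n => PySem.Int.floordiv (n * (n - 1)) 2)).sum
      = ((PySem.Set.ofList (kv.items.map (fun q => PySem.Int.mod q.1 p))).map
          (fun r => pvC2 ((pvVals kv.items p r).length : Int))).sum := by
    rw [hvals', List.map_map]
    congr 1
    apply List.map_congr_left
    intro r _
    simp only [Function.comp]
    rw [pv_count_res]
    rfl
  -- contradictions component
  have hcontra : ((PySem.Dict.counter (kv.items.map (fun q => PySem.Int.mod q.1 p))).items.countP
        (fun rn => decide (2 ≤ rn.2) &&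
          decide (1 < (PySem.Dict.counter ((PySem.Dict.counter
            (pvL kv.items p)).keys.map (fun k => k.1))).getD rn.1 0)))
      = (PySem.Set.ofList (kv.items.map (fun q => PySem.Int.mod q.1 p))).countP
          (fun r => decide (2 ≤ ((pvVals kv.items p r).length : Int) ∧
            (PySem.Set.ofList (pvVals kv.items p r)).length ≠ 1)) := by
    rw [PySem.Dict.items_counter, List.countP_map]
    apply List.countP_congr
    intro r _
    simp only [Function.comp]
    simp only [PySem.Dict.keys_counter, PySem.Dict.getD_counter, pv_distinct, pv_count_res]
    simp only [Bool.and_eq_true, decide_eq_true_eq]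
    constructor
    · rintro ⟨h1, h2⟩
      exact ⟨h1, by omega⟩
    · rintro ⟨h1, h2⟩
      refine ⟨h1, ?_⟩
      have hpos : 0 < (PySem.Set.ofList (pvVals kv.items p r)).length := by
        match hv : pvVals kv.items p r with
        | [] => rw [hv] at h1; simp at h1
        | v :: t =>
          exact List.length_pos_of_mem ((PySem.Set.mem_ofList _ _).mpr List.mem_cons_self)
      omega
  rw [hL, hagree, htotal, hcontra]

-- selection: the running strict-improvement fold is the first maximal candidate
def pvUpd (b c : Int × Int × Int × Int) : Int × Int × Int × Int :=
  if b.2.1 < c.2.1 then c else b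

lemma pv_upd_assoc (b c x : Int × Int × Int × Int) :
    pvUpd (pvUpd b c) x = pvUpd b (pvUpd c x) := by
  unfold pvUpd
  split_ifs <;> first | rfl | (exfalso; omega)

lemma pv_fold_upd (cs : List (Int × Int × Int × Int)) (b c : Int × Int × Int × Int) :
    cs.foldl pvUpd (pvUpd b c)
      = if b.2.1 < (cs.foldl pvUpd c).2.1 then cs.foldl pvUpd c else b := by
  induction cs generalizing b c with
  | nil => rfl
  | cons x cs ih =>
    simp only [List.foldl_cons]
    rw [pv_upd_assoc b c x, ih]

lemma pv_max_cons_cons (m x : Int × Int × Int × Int) (cs : List (Int × Int × Int × Int)) :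
    PySem.List.max? (m :: x :: cs) (fun y => y.2.1)
      = PySem.List.max? (pvUpd m x :: cs) (fun y => y.2.1) := by
  unfold PySem.List.max?
  simp only [List.foldl_cons]
  congr 1
  by_cases h : m.2.1 < x.2.1 <;> simp [pvUpd, h]

lemma pv_max_go (cs : List (Int × Int × Int × Int)) :
    ∀ (m : Int × Int × Int × Int),
      PySem.List.max? (m :: cs) (fun y => y.2.1) = some (cs.foldl pvUpd m) := by
  induction cs with
  | nil => intro m; rfl
  | cons x cs ih =>
    intro m
    rw [pv_max_cons_cons, ih (pvUpd m x)]
    rfl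

lemma pv_fold_max (cs : List (Int × Int × Int × Int)) (b : Int × Int × Int × Int) :
    cs.foldl pvUpd b
      = match PySem.List.max? cs (fun x => x.2.1) with
        | none => b
        | some m => if b.2.1 < m.2.1 then m else b := by
  cases cs with
  | nil => rfl
  | cons c cs =>
    show List.foldl pvUpd (pvUpd b c) cs = _
    rw [pv_fold_upd, pv_max_go cs c]

-- ===== VERDICT (by name: the statement is the Claim_ definition above) =====
theorem best_periodicity_spec : Claim_equal_best_periodicity := by
  intro key_values periods _ _
  unfold Spec_best_periodicity best_periodicity best_periodicity_alt
  simp only [pv_score_eq]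
  -- turn A's conjunctive test into a nested test, then filter it out of the fold
  rw [PySem.List.foldl_congr_mem _ _
      (fun (best : Int × Int × Int × Int) (p : Int) =>
        if 0 < (pv_flat_score (PySem.Dict.ofList key_values).items p).2.1 then
          (if best.2.1 < (pv_flat_score (PySem.Dict.ofList key_values).items p).1 then
            (p, (pv_flat_score (PySem.Dict.ofList key_values).items p).1,
             (pv_flat_score (PySem.Dict.ofList key_values).items p).2.1,
             (pv_flat_score (PySem.Dict.ofList key_values).items p).2.2)
          else best)
        else best)
      ((0 : Int), (0 : Int), (0 : Int), (0 : Int))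
      (by
        intro acc x _
        by_cases h1 : 0 < (pv_flat_score (PySem.Dict.ofList key_values).items x).2.1 <;>
          by_cases h2 : acc.2.1 < (pv_flat_score (PySem.Dict.ofList key_values).items x).1 <;>
          simp [h1, h2])]
  rw [PySem.List.foldl_ite_eq_foldl_filter
      (p := fun p => 0 < (pv_flat_score (PySem.Dict.ofList key_values).items p).2.1)
      (f := fun (best : Int × Int × Int × Int) (p : Int) =>
        if best.2.1 < (pv_flat_score (PySem.Dict.ofList key_values).items p).1 then
          (p, (pv_flat_score (PySem.Dict.ofList key_values).items p).1,
           (pv_flat_score (PySem.Dict.ofList key_values).items p).2.1,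
           (pv_flat_score (PySem.Dict.ofList key_values).items p).2.2)
        else best)]
  -- B's candidate loop is the same filter, mapped to candidate tuples
  rw [PySem.List.foldl_append_ite
      (p := fun p => 0 < (pv_flat_score (PySem.Dict.ofList key_values).items p).2.1)
      (f := fun (p : Int) =>
        ((p, (pv_flat_score (PySem.Dict.ofList key_values).items p).1,
          (pv_flat_score (PySem.Dict.ofList key_values).items p).2.1,
          (pv_flat_score (PySem.Dict.ofList key_values).items p).2.2) : Int × Int × Int × Int))]
  simp only [List.nil_append]
  -- A's filtered fold is the running first-argmax over the candidate list
  rw [PySem.List.foldl_congr_mem _ _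
      (fun (best : Int × Int × Int × Int) (p : Int) =>
        pvUpd best
          (p, (pv_flat_score (PySem.Dict.ofList key_values).items p).1,
           (pv_flat_score (PySem.Dict.ofList key_values).items p).2.1,
           (pv_flat_score (PySem.Dict.ofList key_values).items p).2.2))
      ((0 : Int), (0 : Int), (0 : Int), (0 : Int))
      (by intro acc x _; simp [pvUpd])]
  rw [← List.foldl_map
      (f := fun (p : Int) =>
        ((p, (pv_flat_score (PySem.Dict.ofList key_values).items p).1,
          (pv_flat_score (PySem.Dict.ofList key_values).items p).2.1,
          (pv_flat_score (PySem.Dict.ofList key_values).items p).2.2) : Int × Int × Int × Int))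
      (g := pvUpd)]
  rw [pv_fold_max]
  -- compare the two selections
  cases hm : PySem.List.max?
      ((periods.filter
        (fun p => decide (0 < (pv_flat_score (PySem.Dict.ofList key_values).items p).2.1))).map
        (fun (p : Int) =>
          ((p, (pv_flat_score (PySem.Dict.ofList key_values).items p).1,
            (pv_flat_score (PySem.Dict.ofList key_values).items p).2.1,
            (pv_flat_score (PySem.Dict.ofList key_values).items p).2.2) : Int × Int × Int × Int)))
      (fun x => x.2.1) with
  | none => rfl
  | some m =>
    by_cases h : (0 : Int) < m.2.1
    · simp [h, show ¬ (m.2.1 ≤ 0) by omega]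
    · simp [h, show m.2.1 ≤ 0 by omega]
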